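-- pv_equiv track=rewrite | github.com/corca-ai/charness | plugins/charness/scripts/skill_markdown_lib.py | count_fence_blocks
-- ===== SOURCE A (Python) =====
-- from collections.abc import Iterable
--
-- def count_fence_blocks(lines: Iterable[str]) -> int:
--     count = 0
--     in_fence = False
--     for raw in lines:
--         line = raw.strip()
--         if not line.startswith("```"):
--             continue
--         if in_fence:
--             in_fence = False
--             continue
--         count += 1
--         in_fence = True
--     return count
-- ===== SOURCE B (Python) =====
-- def count_fence_blocks(lines):
--     n = sum(1 for raw in lines if raw.strip().startswith("```"))
--     return (n + 1) // 2
-- ===== Notes on version B (the rewrite author's own statement) =====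
-- stated objective: simpler
-- what changed: Replaces A's per-line open/close in_fence state machine with a stateless one-pass count of all fence-marker lines followed by the closed form (n + 1) // 2.
import Mathlib
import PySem

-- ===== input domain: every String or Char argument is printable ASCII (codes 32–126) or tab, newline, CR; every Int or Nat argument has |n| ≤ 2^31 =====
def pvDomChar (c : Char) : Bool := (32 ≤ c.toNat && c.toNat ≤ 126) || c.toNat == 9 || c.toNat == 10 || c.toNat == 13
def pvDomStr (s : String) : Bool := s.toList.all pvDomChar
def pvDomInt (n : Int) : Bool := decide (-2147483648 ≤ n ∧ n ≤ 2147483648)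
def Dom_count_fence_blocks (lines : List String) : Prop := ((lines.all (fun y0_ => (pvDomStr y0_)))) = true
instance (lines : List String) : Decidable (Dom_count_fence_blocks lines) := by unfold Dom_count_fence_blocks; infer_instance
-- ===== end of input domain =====

-- ===== PORT A =====
-- A: toggling state machine; count is incremented only when a fence line OPENS a block.
def count_fence_blocks (lines : List String) : Int :=
  (lines.foldl (fun st raw =>
    let line := PySem.Str.strip raw
    if ¬ PySem.Str.startswith line "```" then st
    else if st.2 then (st.1, false)
    else (st.1 + 1, true)) ((0 : Int), false)).1

-- ===== PORT B =====
-- B: count every fence-marker line in one stateless pass, then (n + 1) // 2.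
def count_fence_blocks_alt (lines : List String) : Int :=
  let n : Int := (lines.countP (fun raw => PySem.Str.startswith (PySem.Str.strip raw) "```") : Int)
  PySem.Int.floordiv (n + 1) 2

-- ===== PRECONDITION & SPEC =====
def Spec_count_fence_blocks (lines : List String) (out : Int) : Prop := out = count_fence_blocks_alt lines
instance (lines : List String) (out : Int) : Decidable (Spec_count_fence_blocks lines out) := by unfold Spec_count_fence_blocks; infer_instance

-- ===== CLAIM (what is proved, stated in full; the proofs are below) =====
def Claim_equal_count_fence_blocks : Prop := ∀ (lines : List String), Dom_count_fence_blocks lines → Spec_count_fence_blocks lines (count_fence_blocks lines)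

-- ===== LEMMAS AND PROOFS =====
-- Invariant of A's fold: from state (c, f), the final count is
-- c + (number of remaining fence lines + (1 if not in a fence else 0)) // 2.
theorem count_fence_blocks_fold_inv (lines : List String) :
    ∀ (c : Int) (f : Bool),
      (lines.foldl (fun st raw =>
        let line := PySem.Str.strip raw
        if ¬ PySem.Str.startswith line "```" then st
        else if st.2 then (st.1, false)
        else (st.1 + 1, true)) (c, f)).1
      = c + PySem.Int.floordiv
              ((lines.countP (fun raw => PySem.Str.startswith (PySem.Str.strip raw) "```") : Int)
                + (if f then 0 else 1)) 2 := by
  induction lines with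
  | nil =>
      intro c f
      cases f
      · show c = c + PySem.Int.floordiv (0 + 1) 2
        rw [PySem.Int.floordiv_eq_ediv_of_pos (by norm_num)]
        norm_num
      · show c = c + PySem.Int.floordiv (0 + 0) 2
        rw [PySem.Int.floordiv_eq_ediv_of_pos (by norm_num)]
        norm_num
  | cons x xs ih =>
      intro c f
      simp only [List.foldl_cons, List.countP_cons]
      by_cases hx : PySem.Str.startswith (PySem.Str.strip x) "```" = true
      · cases f
        · simp only [hx, not_true, reduceIte, ih,
            PySem.Int.floordiv_eq_ediv_of_pos (b := 2) (by norm_num)]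
          norm_num
          try push_cast
          try omega
        · simp only [hx, not_true, reduceIte, ih,
            PySem.Int.floordiv_eq_ediv_of_pos (b := 2) (by norm_num)]
          norm_num
          try push_cast
          try omega
      · simp only [eq_false_of_ne_true (fun h => hx h), ih]
        norm_num

theorem count_fence_blocks_spec : Claim_equal_count_fence_blocks := by
  intro lines _
  unfold Spec_count_fence_blocks count_fence_blocks count_fence_blocks_alt
  simpa using count_fence_blocks_fold_inv lines 0 false
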